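-- pv_equiv track=rewrite | github.com/maximebf/jinja-macro-tags | jinja_macro_tags.py | find_closing
-- ===== SOURCE A (Python) =====
-- def find_closing(source, chars, start=0):
--     str_open_pos, str_open_char = find_next_char(source, ("'", '"'), start)
--     next_char_pos, next_char = find_next_char(source, chars, start)
--     if next_char_pos == -1:
--         return (-1, "")
--     if str_open_pos == -1 or next_char_pos < str_open_pos:
--         return (next_char_pos, next_char)
--
--     pos = str_open_pos + 1
--     while True:
--         str_close = source.find(str_open_char, pos)
--         if str_close == -1:
--             return (-1, "")
--         if source[str_close - 1] == "\\": # character is escaped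
--             pos = str_close + 1
--         else:
--             break
--     return find_closing(source, chars, str_close + 1)
--
-- def find_next_char(source, chars, start=0):
--     indexes = [(c, source.find(c, start)) for c in chars]
--     min_index = None
--     char = None
--     for c, i in indexes:
--         if i > -1 and (min_index is None or i < min_index):
--             min_index = i
--             char = c
--     if min_index is None:
--         return (-1, "")
--     return (min_index, char)
-- ===== SOURCE B (Python) =====
-- def find_closing(source, chars, start=0):
--     # Single linear left-to-right scan with an in-string state machine,
--     # instead of A's repeated find() passes and recursion.
--     n = len(source)
--     i = start if start >= 0 else max(0, n + start)
--     qc = None  # the quote character of the string literal we are inside, if any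
--     while i <= n:
--         ch = source[i] if i < n else None
--         if qc is None:
--             if ch == "'" or ch == '"':
--                 qc = ch
--             else:
--                 for c in chars:
--                     if source.startswith(c, i):
--                         return (i, c)
--         elif ch == qc and source[i - 1] != "\\":
--             qc = None
--         i += 1
--     return (-1, "")
-- ===== Notes on version B (the rewrite author's own statement) =====
-- stated objective: faster
-- what changed: Replaced A's recursive skip-to-next-quote strategy (which re-runs str.find for every candidate char after each string literal) with one linear left-to-right scan carrying an in-string state, keeping the same quote-priority tie rule and naive backslash-escape rule.
import Mathlib
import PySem

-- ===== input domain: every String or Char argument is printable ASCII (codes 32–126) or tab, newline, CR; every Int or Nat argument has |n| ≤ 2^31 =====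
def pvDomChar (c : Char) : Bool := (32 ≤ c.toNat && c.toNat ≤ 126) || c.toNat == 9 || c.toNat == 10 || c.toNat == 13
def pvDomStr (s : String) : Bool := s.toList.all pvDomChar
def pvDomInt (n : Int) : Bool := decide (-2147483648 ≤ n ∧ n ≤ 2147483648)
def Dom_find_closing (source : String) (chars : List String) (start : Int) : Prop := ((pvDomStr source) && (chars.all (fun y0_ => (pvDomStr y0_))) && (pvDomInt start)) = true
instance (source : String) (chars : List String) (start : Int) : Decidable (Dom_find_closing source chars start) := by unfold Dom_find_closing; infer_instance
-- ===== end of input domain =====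

-- B replaces A's recursive "find the next quote and the next candidate char, then skip
-- string literals with repeated str.find passes and restart" strategy by a single
-- left-to-right scan with an in-string state, keeping A's tie and escape rules.

-- ===== PORT A =====

-- the loop body of find_next_char's 'for c, i in indexes' (min_index/char as one Option)
def fncStep (acc : Option (Int × String)) (ci : String × Int) : Option (Int × String) :=
  match acc with
  | none => if -1 < ci.2 then some (ci.2, ci.1) else none
  | some mc => if -1 < ci.2 ∧ ci.2 < mc.1 then some (ci.2, ci.1) else some mc

-- indexes = [(c, source.find(c, start)) for c in chars], folded by the for loop
def find_next_char (source : String) (chars : List String) (start : Int) : Int × String :=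
  match (chars.map (fun c => (c, PySem.Str.findFrom source c start))).foldl fncStep none with
  | none => (-1, "")
  | some mc => (mc.1, mc.2)

-- the 'while True' escape-skipping loop; gas counts the remaining loop steps (each step
-- moves pos past a found quote, so len+2 steps always suffice: the 0 case is unreachable
-- from strCloseLoop and only makes the recursion structural)
def sclGo (source : String) (qc : String) : Nat → Int → Int
  | 0, _ => -1
  | g + 1, pos =>
    let str_close := PySem.Str.findFrom source qc pos
    if str_close = -1 then -1
    else if PySem.Str.pyGet? source (str_close - 1) = some '\\' then
      sclGo source qc g (str_close + 1)
    else str_close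

def strCloseLoop (source : String) (qc : String) (pos : Int) : Int :=
  sclGo source qc (source.toList.length + 2) pos

-- find_closing's body; gas bounds the recursion depth (each call moves start past a
-- closed string literal, so len+2 always suffices; the 0 case is unreachable)
def fcGo (source : String) (chars : List String) : Nat → Int → Int × String
  | 0, _ => (-1, "")
  | g + 1, start =>
    let so := find_next_char source ["'", "\""] start
    let nc := find_next_char source chars start
    if nc.1 = -1 then (-1, "")
    else if so.1 = -1 ∨ nc.1 < so.1 then nc
    else
      let sc := strCloseLoop source so.2 (so.1 + 1)
      if sc = -1 then (-1, "")
      else fcGo source chars g (sc + 1)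

def find_closing (source : String) (chars : List String) (start : Int) : Int × String :=
  fcGo source chars (source.toList.length + 2) start

-- ===== PORT B =====

-- B's normalisation of the start index: i = start if start >= 0 else max(0, n + start)
def normIdx (n : Nat) (x : Int) : Nat := if 0 ≤ x then x.toNat else (x + n).toNat

-- B's while loop: one pass, i goes from the normalised start to n; qc is the quote char
-- of the string literal we are inside (if any); gas = n + 1 - i is the number of
-- remaining iterations (gas 0 is exactly the loop exit i > n).
-- source.startswith(c, i) is ported as 'c prefix of drop i' (exact for 0 <= i <= len,
-- the only i this loop uses), and source[i-1] as toList[i-1]? (i >= 1 whenever qc is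
-- set, so no negative wraparound).
def scanGo (source : String) (chars : List String) : Nat → Nat → Option Char → Int × String
  | 0, _, _ => (-1, "")
  | g + 1, i, qc =>
    let ch := source.toList[i]?
    match qc with
    | none =>
      if ch = some '\'' ∨ ch = some '"' then scanGo source chars g (i + 1) ch
      else
        match chars.find? (fun c => PySem.Chars.startswith (source.toList.drop i) c.toList) with
        | some c => ((i : Int), c)
        | none => scanGo source chars g (i + 1) none
    | some q =>
      if ch = some q ∧ source.toList[i - 1]? ≠ some '\\' then scanGo source chars g (i + 1) none
      else scanGo source chars g (i + 1) (some q)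

def scanB (source : String) (chars : List String) (i : Nat) (qc : Option Char) : Int × String :=
  scanGo source chars (source.toList.length + 1 - i) i qc

def find_closing_alt (source : String) (chars : List String) (start : Int) : Int × String :=
  scanB source chars (normIdx source.toList.length start) none

-- ===== PRECONDITION & SPEC =====
def Spec_find_closing (source : String) (chars : List String) (start : Int) (out : Int × String) : Prop := out = find_closing_alt source chars start
instance (source : String) (chars : List String) (start : Int) (out : Int × String) : Decidable (Spec_find_closing source chars start out) := by unfold Spec_find_closing; infer_instance

-- ===== CLAIM (what is proved, stated in full; the proofs are below) =====
def Claim_equal_find_closing : Prop := ∀ (source : String) (chars : List String) (start : Int), Dom_find_closing source chars start → Spec_find_closing source chars start (find_closing source chars start)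

-- ===== LEMMAS AND PROOFS =====

-- 'c occurs at position k of source'
def matchAt (L : List Char) (k : Nat) (c : List Char) : Prop := c <+: L.drop k

-- find points at the first occurrence: uniqueness characterisation
theorem find_eq_of (xs cs : List Char) (p : Nat) (h1 : cs <+: xs.drop p)
    (h2 : ∀ q < p, ¬ cs <+: xs.drop q) : PySem.Chars.find xs cs = (p : Int) := by
  have hinf : cs <:+: xs := by
    rw [← PySem.Chars.isIn_iff_infix, ← PySem.Chars.exists_prefix_drop_iff_isIn]
    exact ⟨p, h1⟩
  have hnn : 0 ≤ PySem.Chars.find xs cs := (PySem.Chars.find_nonneg_iff xs cs).2 hinf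
  obtain ⟨hpre, hmin⟩ := PySem.Chars.find_spec hnn
  have h3 : ¬ (PySem.Chars.find xs cs).toNat < p := fun hlt => h2 _ hlt hpre
  have h4 : ¬ p < (PySem.Chars.find xs cs).toNat := fun hlt => hmin p hlt h1
  omega

-- step characterisation of findFrom at a Nat start
theorem FFk (L cs : List Char) (k : Nat) :
    PySem.Chars.findFrom L cs (k : Int) none =
      if L.length < k then -1
      else if PySem.Chars.find (L.drop k) cs = -1 then -1
      else (k : Int) + PySem.Chars.find (L.drop k) cs := by
  simp only [PySem.Chars.findFrom]
  split_ifs <;> simp_all <;> omega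

theorem F_gt (L cs : List Char) (k : Nat) (h : L.length < k) :
    PySem.Chars.findFrom L cs (k : Int) none = -1 := by
  rw [FFk]; simp [h]

theorem F_at (L cs : List Char) (k : Nat) (hk : k ≤ L.length) (h : matchAt L k cs) :
    PySem.Chars.findFrom L cs (k : Int) none = (k : Int) := by
  have h0 : PySem.Chars.find (L.drop k) cs = ((0 : Nat) : Int) :=
    find_eq_of _ _ 0 (by simpa using h) (by omega)
  rw [FFk, if_neg (show ¬ L.length < k by omega), h0]
  norm_num

-- k ≤ len makes the occurrence test at k meaningful; at k = len only cs = [] matches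
theorem F_at_iff (L cs : List Char) (k : Nat) (hk : k ≤ L.length) :
    PySem.Chars.findFrom L cs (k : Int) none = (k : Int) ↔ matchAt L k cs := by
  refine ⟨fun h => ?_, F_at L cs k hk⟩
  rw [FFk, if_neg (show ¬ L.length < k by omega)] at h
  split_ifs at h with h1
  have hnn : (0:Int) ≤ PySem.Chars.find (L.drop k) cs := by
    have := PySem.Chars.neg_one_le_find (L.drop k) cs; omega
  have h0 : (PySem.Chars.find (L.drop k) cs).toNat = 0 := by omega
  have hsp := (PySem.Chars.find_spec hnn).1
  rw [h0] at hsp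
  simpa [matchAt] using hsp

theorem F_step (L cs : List Char) (k : Nat) (hk : k ≤ L.length) (h : ¬ matchAt L k cs) :
    PySem.Chars.findFrom L cs (k : Int) none =
    PySem.Chars.findFrom L cs ((k + 1 : Nat) : Int) none := by
  unfold matchAt at h
  rw [FFk, FFk, if_neg (show ¬ L.length < k by omega)]
  rcases Nat.lt_or_ge L.length (k + 1) with hk1 | hk1
  · have hk' : k = L.length := by omega
    have hnil : L.drop k = [] := by rw [hk']; simp
    have : PySem.Chars.find (L.drop k) cs = -1 := by
      rw [PySem.Chars.find_eq_neg_one_iff]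
      intro hinf
      exact h (by rw [hnil] at hinf ⊢; exact (List.infix_nil.1 hinf) ▸ List.nil_prefix)
    rw [if_pos hk1, this]
    simp
  · rw [if_neg (show ¬ L.length < k + 1 by omega)]
    by_cases hneg : PySem.Chars.find (L.drop (k + 1)) cs = -1
    · have : PySem.Chars.find (L.drop k) cs = -1 := by
        rw [PySem.Chars.find_eq_neg_one_iff] at hneg ⊢
        intro hinf
        apply hneg
        rw [← PySem.Chars.isIn_iff_infix, ← PySem.Chars.exists_prefix_drop_iff_isIn] at hinf ⊢
        obtain ⟨j, hj⟩ := hinf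
        rw [List.drop_drop] at hj
        cases j with
        | zero => exact absurd (by simpa using hj) h
        | succ j =>
          exact ⟨j, by rw [List.drop_drop]; have : k + (j + 1) = k + 1 + j := by omega
                       rw [this] at hj; exact hj⟩
      simp [this, hneg]
    · have hnn : (0:Int) ≤ PySem.Chars.find (L.drop (k + 1)) cs := by
        have := PySem.Chars.neg_one_le_find (L.drop (k + 1)) cs; omega
      obtain ⟨hpre, hmin⟩ := PySem.Chars.find_spec hnn
      rw [List.drop_drop] at hpre
      have hfk : PySem.Chars.find (L.drop k) cs =
          (((PySem.Chars.find (L.drop (k + 1)) cs).toNat + 1 : Nat) : Int) := by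
        apply find_eq_of
        · rw [List.drop_drop]
          have : k + ((PySem.Chars.find (L.drop (k + 1)) cs).toNat + 1) =
              k + 1 + (PySem.Chars.find (L.drop (k + 1)) cs).toNat := by omega
          rw [this]; exact hpre
        · intro q hq
          cases q with
          | zero => simpa using h
          | succ i =>
            intro hc
            rw [List.drop_drop] at hc
            refine hmin i (by omega) ?_
            rw [List.drop_drop]
            have : k + 1 + i = k + (i + 1) := by omega
            rw [this]; exact hc
      rw [hfk, if_neg (show ¬ ((((PySem.Chars.find (List.drop (k + 1) L) cs).toNat + 1 : Nat) : Int)) = -1 by omega), if_neg hneg]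
      push_cast
      omega

-- normalisation: findFrom only sees the clamped start
theorem F_norm (L cs : List Char) (x : Int) :
    PySem.Chars.findFrom L cs x none =
    PySem.Chars.findFrom L cs ((normIdx L.length x : Nat) : Int) none := by
  have hst : (if x < 0 then if x + (L.length : Int) < 0 then 0 else x + (L.length : Int) else x) =
      ((normIdx L.length x : Nat) : Int) := by
    simp only [normIdx]; split_ifs <;> omega
  simp only [PySem.Chars.findFrom]
  rw [hst, if_neg (show ¬ ((normIdx L.length x : Nat) : Int) < 0 by omega)]

-- bounds of str.find(sub, start): a non-(-1) result lies in [max(start,0), len]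
theorem ffBounds (s sub : List Char) (x : Int) (h : PySem.Chars.findFrom s sub x none ≠ -1) :
    0 ≤ PySem.Chars.findFrom s sub x none ∧ x ≤ PySem.Chars.findFrom s sub x none ∧
    PySem.Chars.findFrom s sub x none ≤ s.length := by
  have hle := PySem.Chars.find_le_length (List.drop (if x < 0 then if x + ↑s.length < 0 then 0 else x + ↑s.length else x).toNat (List.take (↑s.length : Int).toNat s)) sub
  have hge := PySem.Chars.neg_one_le_find (List.drop (if x < 0 then if x + ↑s.length < 0 then 0 else x + ↑s.length else x).toNat (List.take (↑s.length : Int).toNat s)) sub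
  simp only [PySem.Chars.findFrom] at h ⊢
  split_ifs at h ⊢ with h1 h2 h3 h4 h5 h6 <;>
    simp_all [List.length_drop] <;> omega

-- a start beyond the string finds nothing
theorem ffNone (s sub : List Char) (x : Int) (h : (s.length : Int) < x) :
    PySem.Chars.findFrom s sub x none = -1 := by
  by_contra hne
  have := ffBounds s sub x hne
  omega

-- any some-accumulator of the fold keeps a first component > -1
theorem fncStep_some_pos (l : List (String × Int)) :
    ∀ (acc : Option (Int × String)) (m : Int) (ch : String),
      (acc = none ∨ ∃ m' ch', acc = some (m', ch') ∧ -1 < m') →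
      List.foldl fncStep acc l = some (m, ch) → -1 < m := by
  induction l with
  | nil =>
    rintro acc m ch (rfl | ⟨m', ch', rfl, hm⟩) hf
    · simp at hf
    · simp at hf; omega
  | cons q l ih =>
    rintro acc m ch hacc hf
    refine ih _ m ch ?_ hf
    rcases hacc with rfl | ⟨m', ch', rfl, hm⟩
    · by_cases h1 : -1 < q.2
      · exact Or.inr ⟨q.2, q.1, by simp [fncStep, h1], h1⟩
      · exact Or.inl (by simp [fncStep, h1])
    · by_cases h1 : -1 < q.2 ∧ q.2 < m'
      · exact Or.inr ⟨q.2, q.1, by simp [fncStep, h1.1, h1.2], h1.1⟩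
      · exact Or.inr ⟨m', ch', by simp only [fncStep]; rw [if_neg h1], hm⟩

theorem fncStep_result (l : List (String × Int)) (acc : Option (Int × String)) :
    List.foldl fncStep acc l = acc ∨ ∃ p ∈ l, List.foldl fncStep acc l = some (p.2, p.1) := by
  induction l generalizing acc with
  | nil => left; rfl
  | cons p l ih =>
    have hstep : fncStep acc p = acc ∨ fncStep acc p = some (p.2, p.1) := by
      match acc with
      | none =>
        by_cases h1 : -1 < p.2
        · exact Or.inr (by simp [fncStep, h1])
        · exact Or.inl (by simp [fncStep, h1])
      | some mc =>
        by_cases h1 : -1 < p.2 ∧ p.2 < mc.1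
        · exact Or.inr (by simp [fncStep, h1.1, h1.2])
        · exact Or.inl (by simp only [fncStep]; rw [if_neg h1])
    rcases ih (fncStep acc p) with h | ⟨q, hq, h⟩
    · rcases hstep with h' | h'
      · left; rw [List.foldl_cons, h, h']
      · right; exact ⟨p, by simp, by rw [List.foldl_cons, h, h']⟩
    · right; exact ⟨q, by simp [hq], h⟩

-- a non-(-1) result of find_next_char is one of the findFrom values
theorem fnc_cases (source : String) (chars : List String) (start : Int) :
    find_next_char source chars start = (-1, "") ∨
    ∃ c ∈ chars, find_next_char source chars start =
      (PySem.Chars.findFrom source.toList c.toList start none, c) ∧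
      PySem.Chars.findFrom source.toList c.toList start none ≠ -1 := by
  unfold find_next_char
  rcases fncStep_result (chars.map (fun c => (c, PySem.Str.findFrom source c start))) none
    with h | ⟨p, hp, h⟩
  · left; rw [h]
  · rcases List.mem_map.1 hp with ⟨c, hc, rfl⟩
    have hpos : -1 < PySem.Str.findFrom source c start :=
      fncStep_some_pos _ none _ _ (Or.inl rfl) h
    right
    refine ⟨c, hc, ?_, ?_⟩
    · rw [h]; simp [PySem.Str.findFrom_eq]
    · rw [← PySem.Str.findFrom_eq]; omega

-- the escape loop's value does not depend on the gas once there is enough of it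
theorem sclGo_congr (source qc : String) (g1 g2 : Nat) (pos : Int)
    (h1 : source.toList.length + 1 ≤ g1 + pos.toNat)
    (h2 : source.toList.length + 1 ≤ g2 + pos.toNat) :
    sclGo source qc g1 pos = sclGo source qc g2 pos := by
  induction g1 generalizing g2 pos with
  | zero =>
    have hf : PySem.Chars.findFrom source.toList qc.toList pos none = -1 :=
      ffNone _ _ _ (by omega)
    cases g2 with
    | zero => rfl
    | succ g2 => simp [sclGo, PySem.Str.findFrom_eq, hf]
  | succ g1 ih =>
    cases g2 with
    | zero =>
      have hf : PySem.Chars.findFrom source.toList qc.toList pos none = -1 :=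
        ffNone _ _ _ (by omega)
      simp [sclGo, PySem.Str.findFrom_eq, hf]
    | succ g2 =>
      simp only [sclGo]
      split_ifs with hf hesc
      · rfl
      · have hb := ffBounds source.toList qc.toList pos (by rw [← PySem.Str.findFrom_eq]; exact hf)
        rw [← PySem.Str.findFrom_eq] at hb
        exact ih g2 _ (by omega) (by omega)
      · rfl

-- one unrolling of the escape loop (str_close inlined)
theorem scl_eq (source qc : String) (pos : Int) :
    strCloseLoop source qc pos =
      (if PySem.Str.findFrom source qc pos = -1 then -1
       else if PySem.Str.pyGet? source (PySem.Str.findFrom source qc pos - 1) = some '\\' then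
         strCloseLoop source qc (PySem.Str.findFrom source qc pos + 1)
       else PySem.Str.findFrom source qc pos) := by
  show sclGo source qc (source.toList.length + 1 + 1) pos = _
  rw [sclGo]
  split_ifs with hf hesc
  · rfl
  · show _ = strCloseLoop source qc (PySem.Str.findFrom source qc pos + 1)
    unfold strCloseLoop
    exact sclGo_congr source qc (source.toList.length + 1) (source.toList.length + 2)
      (PySem.Str.findFrom source qc pos + 1) (by omega) (by omega)
  · rfl

theorem strCloseLoop_bounds (source : String) (qc : String) (pos : Int)
    (h : strCloseLoop source qc pos ≠ -1) :
    pos ≤ strCloseLoop source qc pos ∧ 0 ≤ strCloseLoop source qc pos ∧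
    strCloseLoop source qc pos ≤ source.toList.length := by
  have H : ∀ (d : Nat) (pos : Int), source.toList.length + 1 ≤ d + pos.toNat →
      strCloseLoop source qc pos ≠ -1 →
      pos ≤ strCloseLoop source qc pos ∧ 0 ≤ strCloseLoop source qc pos ∧
      strCloseLoop source qc pos ≤ source.toList.length := by
    intro d
    induction d with
    | zero =>
      intro pos hd hne
      exfalso
      apply hne
      rw [scl_eq]
      have hf : PySem.Chars.findFrom source.toList qc.toList pos none = -1 :=
        ffNone _ _ _ (by omega)
      simp [PySem.Str.findFrom_eq, hf]
    | succ d ih =>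
      intro pos hd hne
      rw [scl_eq] at hne ⊢
      split_ifs at hne ⊢ with hf hesc
      · exact absurd rfl hne
      · have hb := ffBounds source.toList qc.toList pos (by rw [← PySem.Str.findFrom_eq]; exact hf)
        rw [← PySem.Str.findFrom_eq] at hb
        have := ih (PySem.Str.findFrom source qc pos + 1) (by omega) hne
        omega
      · have hb := ffBounds source.toList qc.toList pos (by rw [← PySem.Str.findFrom_eq]; exact hf)
        rw [← PySem.Str.findFrom_eq] at hb
        omega
  exact H (source.toList.length + 1) pos (by omega) h

-- all candidates absent ↔ find_next_char fails (forward declaration used by fcGo_congr)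
theorem fold_none_of_all_neg' (l : List (String × Int)) (h : ∀ p ∈ l, p.2 = -1) :
    List.foldl fncStep none l = none := by
  induction l with
  | nil => rfl
  | cons p l ih =>
    rw [List.foldl_cons]
    have hp : fncStep none p = none := by
      simp [fncStep, h p (by simp)]
    rw [hp]
    exact ih fun q hq => h q (by simp [hq])

theorem fnc_none_of_gt (source : String) (cs : List String) (x : Int)
    (h : (source.toList.length : Int) < x) :
    find_next_char source cs x = (-1, "") := by
  unfold find_next_char
  rw [fold_none_of_all_neg']
  intro p hp
  rcases List.mem_map.1 hp with ⟨c, hc, rfl⟩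
  rw [PySem.Str.findFrom_eq]
  exact ffNone _ _ _ h

-- find_closing's value does not depend on the gas once there is enough of it
theorem fcGo_congr (source : String) (chars : List String) (g1 g2 : Nat) (start : Int)
    (h1 : source.toList.length + 1 ≤ g1 + start.toNat)
    (h2 : source.toList.length + 1 ≤ g2 + start.toNat) :
    fcGo source chars g1 start = fcGo source chars g2 start := by
  induction g1 generalizing g2 start with
  | zero =>
    cases g2 with
    | zero => rfl
    | succ g2 =>
      have hnc := fnc_none_of_gt source chars start (by omega)
      simp [fcGo, hnc]
  | succ g1 ih =>
    cases g2 with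
    | zero =>
      have hnc := fnc_none_of_gt source chars start (by omega)
      simp [fcGo, hnc]
    | succ g2 =>
      simp only [fcGo]
      split_ifs with hnc hso hsc
      · rfl
      · rfl
      · rfl
      · -- the recursive branch: the skip loop moved start strictly forward
        have hso1 : ¬ (find_next_char source ["'", "\""] start).1 = -1 := fun h => hso (Or.inl h)
        have hso2 : start ≤ (find_next_char source ["'", "\""] start).1 ∧
            0 ≤ (find_next_char source ["'", "\""] start).1 := by
          rcases fnc_cases source ["'", "\""] start with h | ⟨c, _, heq, hne⟩
          · rw [h] at hso1; simp at hso1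
          · rw [heq]
            have := ffBounds source.toList c.toList start hne
            exact ⟨this.2.1, this.1⟩
        have hb := strCloseLoop_bounds source (find_next_char source ["'", "\""] start).2
          ((find_next_char source ["'", "\""] start).1 + 1) hsc
        exact ih g2 _ (by omega) (by omega)

-- one unrolling of find_closing (so / nc / sc inlined)
theorem fc_eq (source : String) (chars : List String) (start : Int) :
    find_closing source chars start =
      (if (find_next_char source chars start).1 = -1 then (-1, "")
       else if (find_next_char source ["'", "\""] start).1 = -1 ∨
           (find_next_char source chars start).1 < (find_next_char source ["'", "\""] start).1 then
         find_next_char source chars start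
       else if strCloseLoop source (find_next_char source ["'", "\""] start).2
           ((find_next_char source ["'", "\""] start).1 + 1) = -1 then (-1, "")
       else find_closing source chars
         (strCloseLoop source (find_next_char source ["'", "\""] start).2
           ((find_next_char source ["'", "\""] start).1 + 1) + 1)) := by
  show fcGo source chars (source.toList.length + 1 + 1) start = _
  rw [fcGo]
  simp only [letFun]
  split_ifs with hnc hso hsc
  · rfl
  · rfl
  · rfl
  · show _ = find_closing source chars
      (strCloseLoop source (find_next_char source ["'", "\""] start).2
        ((find_next_char source ["'", "\""] start).1 + 1) + 1)
    unfold find_closing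
    have hso1 : ¬ (find_next_char source ["'", "\""] start).1 = -1 := fun h => hso (Or.inl h)
    have hso2 : 0 ≤ (find_next_char source ["'", "\""] start).1 := by
      rcases fnc_cases source ["'", "\""] start with h | ⟨c, _, heq, hne⟩
      · rw [h] at hso1; simp at hso1
      · rw [heq]
        exact (ffBounds source.toList c.toList start hne).1
    have hb := strCloseLoop_bounds source (find_next_char source ["'", "\""] start).2
      ((find_next_char source ["'", "\""] start).1 + 1) hsc
    exact fcGo_congr source chars (source.toList.length + 1) (source.toList.length + 2)
      (strCloseLoop source (find_next_char source ["'", "\""] start).2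
        ((find_next_char source ["'", "\""] start).1 + 1) + 1) (by omega) (by omega)

-- a findFrom value at a Nat start is -1 or at least that start
theorem F_lb (s sub : List Char) (k : Nat) :
    PySem.Chars.findFrom s sub (k : Int) none = -1 ∨
    (k : Int) ≤ PySem.Chars.findFrom s sub (k : Int) none := by
  by_cases h : PySem.Chars.findFrom s sub (k : Int) none = -1
  · exact Or.inl h
  · exact Or.inr (ffBounds s sub k h).2.1

-- a failed findFrom means no occurrence anywhere to the right (within the string)
theorem F_none_no_match (L cs : List Char) (k j : Nat)
    (h : PySem.Chars.findFrom L cs (k : Int) none = -1) (hkj : k ≤ j) (hj : j ≤ L.length) :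
    ¬ matchAt L j cs := by
  intro hm
  rw [FFk, if_neg (show ¬ L.length < k by omega)] at h
  split_ifs at h with h1
  · rw [PySem.Chars.find_eq_neg_one_iff] at h1
    apply h1
    rw [← PySem.Chars.isIn_iff_infix, ← PySem.Chars.exists_prefix_drop_iff_isIn]
    exact ⟨j - k, by rw [List.drop_drop, Nat.add_sub_cancel' hkj]; exact hm⟩
  · have := PySem.Chars.neg_one_le_find (List.drop k L) cs
    omega

-- singleton occurrence = the character at that position
theorem matchAt_singleton (L : List Char) (k : Nat) (q : Char) :
    matchAt L k [q] ↔ L[k]? = some q := by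
  unfold matchAt
  rw [List.cons_prefix_iff, ← List.head?_drop]
  constructor
  · rintro ⟨t, ht, -⟩; rw [ht]; rfl
  · intro h
    cases hd : L.drop k with
    | nil => rw [hd] at h; simp at h
    | cons a t => rw [hd] at h; simp at h; exact ⟨t, by rw [h], List.nil_prefix⟩

theorem startswith_matchAt (L : List Char) (k : Nat) (c : List Char) :
    PySem.Chars.startswith (L.drop k) c = true ↔ matchAt L k c :=
  PySem.Chars.startswith_iff _ _

-- find_next_char congruence: it only depends on the findFrom values
theorem fnc_congr (source : String) (cs : List String) (x y : Int)
    (h : ∀ c ∈ cs, PySem.Chars.findFrom source.toList c.toList x none =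
                   PySem.Chars.findFrom source.toList c.toList y none) :
    find_next_char source cs x = find_next_char source cs y := by
  unfold find_next_char
  have : cs.map (fun c => (c, PySem.Str.findFrom source c x)) =
         cs.map (fun c => (c, PySem.Str.findFrom source c y)) :=
    List.map_congr_left fun c hc => by
      rw [PySem.Str.findFrom_eq, PySem.Str.findFrom_eq, h c hc]
  rw [this]

theorem fold_some_ne_none (l : List (String × Int)) (mc : Int × String) :
    List.foldl fncStep (some mc) l ≠ none := by
  induction l generalizing mc with
  | nil => simp
  | cons p l ih =>
    rw [List.foldl_cons]
    by_cases h1 : -1 < p.2 ∧ p.2 < mc.1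
    · rw [show fncStep (some mc) p = some (p.2, p.1) by simp [fncStep, h1.1, h1.2]]
      exact ih _
    · rw [show fncStep (some mc) p = some mc by simp only [fncStep]; rw [if_neg h1]]
      exact ih _

-- all candidates absent ↔ find_next_char fails
theorem fnc_none_iff (source : String) (cs : List String) (x : Int) :
    (find_next_char source cs x).1 = -1 ↔
    ∀ c ∈ cs, PySem.Chars.findFrom source.toList c.toList x none = -1 := by
  constructor
  · intro hfst c hc
    by_contra hne
    have hpos : -1 < PySem.Chars.findFrom source.toList c.toList x none := by
      have := ffBounds source.toList c.toList x hne; omega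
    -- the fold cannot end in none once a positive value is seen
    have : List.foldl fncStep none (cs.map (fun c => (c, PySem.Str.findFrom source c x))) ≠ none := by
      obtain ⟨l1, l2, hsplit⟩ := List.append_of_mem (List.mem_map_of_mem hc
        (f := fun c => (c, PySem.Str.findFrom source c x)))
      rw [hsplit, List.foldl_append, List.foldl_cons]
      rcases fncStep_result l1 (none : Option (Int × String)) with hl | ⟨p, _, hl⟩
      · rw [hl, show fncStep none (c, PySem.Str.findFrom source c x) =
            some (PySem.Str.findFrom source c x, c) by simp [fncStep, hpos]]
        exact fold_some_ne_none _ _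
      · rw [hl]
        have hp : -1 < p.2 := fncStep_some_pos l1 none _ _ (Or.inl rfl) hl
        by_cases h1 : -1 < (c, PySem.Str.findFrom source c x).2 ∧
            (c, PySem.Str.findFrom source c x).2 < (p.2, p.1).1
        · rw [show fncStep (some (p.2, p.1)) (c, PySem.Str.findFrom source c x) =
              some ((c, PySem.Str.findFrom source c x).2, c) by
                simp only [fncStep]; rw [if_pos h1]]
          exact fold_some_ne_none _ _
        · rw [show fncStep (some (p.2, p.1)) (c, PySem.Str.findFrom source c x) =
              some (p.2, p.1) by simp only [fncStep]; rw [if_neg h1]]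
          exact fold_some_ne_none _ _
    unfold find_next_char at hfst
    cases hfold : List.foldl fncStep none (cs.map (fun c => (c, PySem.Str.findFrom source c x))) with
    | none => exact this hfold
    | some mc =>
      rw [hfold] at hfst
      simp only at hfst
      have := fncStep_some_pos (cs.map (fun c => (c, PySem.Str.findFrom source c x)))
        none mc.1 mc.2 (Or.inl rfl) (by rw [hfold])
      omega
  · intro hall
    have : List.foldl fncStep none (cs.map (fun c => (c, PySem.Str.findFrom source c x))) = none := by
      apply fold_none_of_all_neg'
      intro p hp
      rcases List.mem_map.1 hp with ⟨c, hc, rfl⟩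
      rw [PySem.Str.findFrom_eq]
      exact hall c hc
    unfold find_next_char
    rw [this]

-- fold over values that are -1 or > k keeps 'none or a minimum above k'
theorem fold_gtk (k : Int) (l : List (String × Int)) (h : ∀ p ∈ l, p.2 = -1 ∨ k < p.2) :
    ∀ acc, (acc = none ∨ ∃ m ch, acc = some (m, ch) ∧ k < m) →
      (List.foldl fncStep acc l = none ∨
       ∃ m ch, List.foldl fncStep acc l = some (m, ch) ∧ k < m) := by
  induction l with
  | nil => intro acc hacc; simpa using hacc
  | cons p l ih =>
    intro acc hacc
    rw [List.foldl_cons]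
    refine ih (fun q hq => h q (by simp [hq])) _ ?_
    rcases hacc with rfl | ⟨m, ch, rfl, hm⟩
    · by_cases h1 : -1 < p.2
      · right
        refine ⟨p.2, p.1, by simp [fncStep, h1], ?_⟩
        rcases h p (by simp) with h2 | h2 <;> omega
      · left; simp [fncStep, h1]
    · by_cases h1 : -1 < p.2 ∧ p.2 < m
      · right
        refine ⟨p.2, p.1, by simp [fncStep, h1.1, h1.2], ?_⟩
        rcases h p (by simp) with h2 | h2 <;> omega
      · right
        exact ⟨m, ch, by simp only [fncStep]; rw [if_neg h1], hm⟩

-- fold with an exact minimum k already stored never changes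
theorem fold_keep (k : Int) (c0 : String) (l : List (String × Int))
    (h : ∀ p ∈ l, p.2 = -1 ∨ k ≤ p.2) :
    List.foldl fncStep (some (k, c0)) l = some (k, c0) := by
  induction l with
  | nil => rfl
  | cons p l ih =>
    rw [List.foldl_cons]
    have : fncStep (some (k, c0)) p = some (k, c0) := by
      simp only [fncStep]
      rw [if_neg (by rcases h p (by simp) with h2 | h2 <;> simp <;> omega)]
    rw [this]
    exact ih fun q hq => h q (by simp [hq])

-- first candidate matching exactly at k wins
theorem fnc_at (source : String) (cs : List String) (k : Nat) (c0 : String)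
    (h : cs.find? (fun c => PySem.Chars.startswith (source.toList.drop k) c.toList) = some c0)
    (hk : k ≤ source.toList.length) :
    find_next_char source cs (k : Int) = ((k : Int), c0) := by
  rw [List.find?_eq_some_iff_append] at h
  obtain ⟨hp0, as, bs, rfl, hpre⟩ := h
  have hmatch : matchAt source.toList k c0.toList := (startswith_matchAt _ _ _).1 hp0
  have hF0 : PySem.Chars.findFrom source.toList c0.toList (k : Int) none = (k : Int) :=
    F_at _ _ _ hk hmatch
  unfold find_next_char
  rw [List.map_append, List.map_cons, List.foldl_append, List.foldl_cons]
  have has : ∀ p ∈ as.map (fun c => (c, PySem.Str.findFrom source c k)), p.2 = -1 ∨ (k:Int) < p.2 := by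
    intro p hp
    rcases List.mem_map.1 hp with ⟨c, hc, rfl⟩
    simp only [PySem.Str.findFrom_eq]
    rcases F_lb source.toList c.toList k with h1 | h1
    · exact Or.inl h1
    · right
      rcases lt_or_eq_of_le h1 with h2 | h2
      · exact h2
      · exfalso
        have hmc : matchAt source.toList k c.toList := (F_at_iff _ _ _ hk).1 h2.symm
        have hns : ¬ matchAt source.toList k c.toList := by
          rw [← startswith_matchAt]
          have := hpre c hc
          simp at this
          simp [this]
        exact hns hmc
  have hv : PySem.Str.findFrom source c0 (k : Int) = (k : Int) := by
    rw [PySem.Str.findFrom_eq]; exact hF0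
  have hbs : ∀ p ∈ bs.map (fun c => (c, PySem.Str.findFrom source c k)), p.2 = -1 ∨ (k:Int) ≤ p.2 := by
    intro p hp
    rcases List.mem_map.1 hp with ⟨c, hc, rfl⟩
    simp only [PySem.Str.findFrom_eq]
    exact F_lb source.toList c.toList k
  rcases fold_gtk (k:Int) _ has none (Or.inl rfl) with hfold | ⟨m, ch, hfold, hm⟩
  · rw [hfold, hv,
      show fncStep none (c0, (k:Int)) = some ((k:Int), c0) by
        simp [fncStep, show (-1:Int) < (k:Int) by omega],
      fold_keep _ _ _ hbs]
  · rw [hfold, hv,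
      show fncStep (some (m, ch)) (c0, (k:Int)) = some ((k:Int), c0) by
        simp only [fncStep]
        rw [if_pos ⟨show (-1:Int) < ((c0, (k:Int)) : String × Int).2 by simp; omega,
                    show ((c0, (k:Int)) : String × Int).2 < (m, ch).1 by simpa using hm⟩],
      fold_keep _ _ _ hbs]

theorem scanB_gt (source : String) (cs : List String) (i : Nat) (qc : Option Char)
    (h : ¬ i ≤ source.toList.length) : scanB source cs i qc = (-1, "") := by
  unfold scanB
  rw [show source.toList.length + 1 - i = 0 from by omega]
  rfl

theorem scanB_none_unfold (source : String) (cs : List String) (i : Nat)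
    (h : i ≤ source.toList.length) :
    scanB source cs i none =
      if source.toList[i]? = some '\'' ∨ source.toList[i]? = some '"' then
        scanB source cs (i + 1) source.toList[i]?
      else
        match cs.find? (fun c => PySem.Chars.startswith (source.toList.drop i) c.toList) with
        | some c => ((i : Int), c)
        | none => scanB source cs (i + 1) none := by
  unfold scanB
  rw [show source.toList.length + 1 - i = (source.toList.length - i) + 1 from by omega,
      show source.toList.length + 1 - (i + 1) = source.toList.length - i from by omega]
  rfl

theorem scanB_some_unfold (source : String) (cs : List String) (i : Nat) (q : Char)
    (h : i ≤ source.toList.length) :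
    scanB source cs i (some q) =
      if source.toList[i]? = some q ∧ source.toList[i - 1]? ≠ some '\\' then
        scanB source cs (i + 1) none
      else scanB source cs (i + 1) (some q) := by
  unfold scanB
  rw [show source.toList.length + 1 - i = (source.toList.length - i) + 1 from by omega,
      show source.toList.length + 1 - (i + 1) = source.toList.length - i from by omega]
  rfl

-- no candidate present from k: the scan returns (-1, "") whatever its state
theorem scan_none (source : String) (cs : List String) (k : Nat)
    (h : ∀ c ∈ cs, PySem.Chars.findFrom source.toList c.toList (k : Int) none = -1) :
    ∀ (j : Nat) (qc : Option Char), k ≤ j → scanB source cs j qc = (-1, "") := by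
  have H : ∀ (d j : Nat) (qc : Option Char), k ≤ j → source.toList.length + 1 - j ≤ d →
      scanB source cs j qc = (-1, "") := by
    intro d
    induction d with
    | zero => intro j qc hkj hd; exact scanB_gt source cs j qc (by omega)
    | succ d ih =>
      intro j qc hkj hd
      by_cases hle : j ≤ source.toList.length
      · have hrec : ∀ qc', scanB source cs (j + 1) qc' = (-1, "") :=
          fun qc' => ih (j + 1) qc' (by omega) (by omega)
        have hfind : cs.find? (fun c => PySem.Chars.startswith (source.toList.drop j) c.toList)
            = none := by
          rw [List.find?_eq_none]
          intro c hc hsw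
          exact F_none_no_match source.toList c.toList k j (h c hc) hkj hle
            ((startswith_matchAt _ _ _).1 hsw)
        cases qc with
        | none =>
          rw [scanB_none_unfold source cs j hle]
          split_ifs with hq
          · exact hrec _
          · rw [hfind]
            exact hrec none
        | some q =>
          rw [scanB_some_unfold source cs j q hle]
          split_ifs with hq
          · exact hrec none
          · exact hrec (some q)
      · exact scanB_gt source cs j qc hle
  exact fun j qc hkj => H (source.toList.length + 1 - j) j qc hkj le_rfl

-- the skip loop only depends on the value of its first find
theorem scl_congr (source qs : String) (x y : Int)
    (h : PySem.Str.findFrom source qs x = PySem.Str.findFrom source qs y) :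
    strCloseLoop source qs x = strCloseLoop source qs y := by
  conv_lhs => rw [scl_eq]
  conv_rhs => rw [scl_eq]
  rw [h]

-- the in-string phase of the scan is A's escape-skipping find loop
theorem scan_instr (source : String) (cs : List String) (q : Char) (qs : String)
    (hq : qs.toList = [q]) :
    ∀ (j : Nat), 1 ≤ j →
      scanB source cs j (some q) =
        (if strCloseLoop source qs (j : Int) = -1 then (-1, "")
         else scanB source cs ((strCloseLoop source qs (j : Int)).toNat + 1) none) := by
  have hFq : ∀ (m : Nat), PySem.Str.findFrom source qs ((m : Nat) : Int) =
      PySem.Chars.findFrom source.toList [q] ((m : Nat) : Int) none := by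
    intro m; rw [PySem.Str.findFrom_eq, hq]
  have hgt_case : ∀ j : Nat, source.toList.length < j →
      scanB source cs j (some q) =
        (if strCloseLoop source qs (j : Int) = -1 then (-1, "")
         else scanB source cs ((strCloseLoop source qs (j : Int)).toNat + 1) none) := by
    intro j hgt
    rw [scanB_gt source cs j _ (by omega)]
    have hscl : strCloseLoop source qs (j : Int) = -1 := by
      rw [scl_eq]
      rw [hFq j, F_gt source.toList [q] j hgt]
      simp
    rw [hscl]
    simp
  have H : ∀ (d j : Nat), 1 ≤ j → source.toList.length + 1 - j ≤ d →
      scanB source cs j (some q) =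
        (if strCloseLoop source qs (j : Int) = -1 then (-1, "")
         else scanB source cs ((strCloseLoop source qs (j : Int)).toNat + 1) none) := by
    intro d
    induction d with
    | zero => intro j h1 hd; exact hgt_case j (by omega)
    | succ d ih =>
      intro j h1 hd
      by_cases hle : j ≤ source.toList.length
      · have hget : PySem.Str.pyGet? source ((j : Int) - 1) = source.toList[j - 1]? := by
          have hc : ((j : Int) - 1) = ((j - 1 : Nat) : Int) := by omega
          rw [hc, PySem.Str.pyGet?_eq]
          exact PySem.List.pyGet?_natCast _ _
        by_cases hmq : source.toList[j]? = some q
        · have hm : matchAt source.toList j [q] := (matchAt_singleton _ _ _).2 hmq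
          have hF : PySem.Chars.findFrom source.toList [q] ((j : Nat) : Int) none = (j : Int) :=
            F_at _ _ _ hle hm
          by_cases hesc : source.toList[j - 1]? = some '\\'
          · have hscl : strCloseLoop source qs (j : Int) =
                strCloseLoop source qs (((j + 1 : Nat) : Nat) : Int) := by
              conv_lhs => rw [scl_eq]
              rw [hFq j, hF, if_neg (show ¬ (j : Int) = -1 by omega), hget, if_pos hesc]
              have : (j : Int) + 1 = ((j + 1 : Nat) : Int) := by omega
              rw [this]
            rw [scanB_some_unfold source cs j q hle, if_neg (fun hc => hc.2 hesc)]
            rw [ih (j + 1) (by omega) (by omega), hscl]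
          · have hscl : strCloseLoop source qs (j : Int) = (j : Int) := by
              conv_lhs => rw [scl_eq]
              rw [hFq j, hF, if_neg (show ¬ (j : Int) = -1 by omega), hget, if_neg hesc]
            rw [scanB_some_unfold source cs j q hle, if_pos ⟨hmq, hesc⟩, hscl]
            rw [if_neg (show ¬ (j : Int) = -1 by omega)]
            norm_num
        · have hnm : ¬ matchAt source.toList j [q] :=
            fun hm => hmq ((matchAt_singleton _ _ _).1 hm)
          have hstep : PySem.Str.findFrom source qs ((j : Nat) : Int) =
              PySem.Str.findFrom source qs (((j + 1 : Nat) : Nat) : Int) := by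
            rw [hFq j, hFq (j + 1)]
            exact F_step source.toList [q] j hle hnm
          have hscl : strCloseLoop source qs (j : Int) =
              strCloseLoop source qs (((j + 1 : Nat) : Nat) : Int) := scl_congr _ _ _ _ hstep
          rw [scanB_some_unfold source cs j q hle, if_neg (fun hc => hmq hc.1)]
          rw [ih (j + 1) (by omega) (by omega), hscl]
      · exact hgt_case j (by omega)
  exact fun j h1 => H (source.toList.length + 1 - j) j h1 le_rfl

-- the two quote candidates of A, evaluated at a known quote position
theorem fnc_quotes_at (source : String) (k : Nat) (hk : k ≤ source.toList.length)
    (q : Char) (qs : String) (hqs : qs.toList = [q])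
    (hcase : (q = '\'' ∧ qs = "'") ∨ (q = '"' ∧ qs = "\""))
    (hq1 : source.toList[k]? = some q) :
    find_next_char source ["'", "\""] (k : Int) = ((k : Int), qs) := by
  apply fnc_at source ["'", "\""] k qs _ hk
  rcases hcase with ⟨rfl, rfl⟩ | ⟨rfl, rfl⟩
  · rw [List.find?_cons_of_pos]
    exact (startswith_matchAt _ _ _).2 ((matchAt_singleton _ _ _).2 hq1)
  · rw [List.find?_cons_of_neg, List.find?_cons_of_pos]
    · exact (startswith_matchAt _ _ _).2 ((matchAt_singleton _ _ _).2 hq1)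
    · intro hsw
      rw [show ("'" : String).toList = ['\''] from rfl] at hsw
      have := (matchAt_singleton _ _ _).1 ((startswith_matchAt _ _ _).1 hsw)
      rw [hq1] at this
      exact absurd (Option.some.inj this) (by decide)

theorem main_lemma (source : String) (chars : List String) (k : Nat) :
    find_closing source chars (k : Int) = scanB source chars k none := by
  have H : ∀ (d k : Nat), source.toList.length + 1 - k ≤ d →
      find_closing source chars (k : Int) = scanB source chars k none := by
    intro d
    induction d with
    | zero =>
      intro k hd
      have hgt : source.toList.length < k := by omega
      have hnc : (find_next_char source chars (k : Int)).1 = -1 :=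
        (fnc_none_iff source chars (k : Int)).2 fun c _ => F_gt _ _ _ hgt
      conv_lhs => rw [fc_eq]
      rw [if_pos hnc, scanB_gt source chars k none (by omega)]
    | succ d ih =>
      intro k hd
      by_cases hk : k ≤ source.toList.length
      swap
      · have hnc : (find_next_char source chars (k : Int)).1 = -1 :=
          (fnc_none_iff source chars (k : Int)).2 fun c _ => F_gt _ _ _ (by omega)
        conv_lhs => rw [fc_eq]
        rw [if_pos hnc, scanB_gt source chars k none hk]
      by_cases hquote : source.toList[k]? = some '\'' ∨ source.toList[k]? = some '"'
      · -- a quote opens at k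
        obtain ⟨q, qs, hqs, hcase, hq1⟩ :
            ∃ (q : Char) (qs : String), qs.toList = [q] ∧
              ((q = '\'' ∧ qs = "'") ∨ (q = '"' ∧ qs = "\"")) ∧
              source.toList[k]? = some q := by
          rcases hquote with h | h
          · exact ⟨'\'', "'", rfl, Or.inl ⟨rfl, rfl⟩, h⟩
          · exact ⟨'"', "\"", rfl, Or.inr ⟨rfl, rfl⟩, h⟩
        have hso := fnc_quotes_at source k hk q qs hqs hcase hq1
        have hso1 : (find_next_char source ["'", "\""] (k : Int)).1 = (k : Int) := by rw [hso]
        have hso2 : (find_next_char source ["'", "\""] (k : Int)).2 = qs := by rw [hso]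
        -- B takes the quote branch
        rw [scanB_none_unfold source chars k hk, if_pos hquote, hq1]
        by_cases hnc : (find_next_char source chars (k : Int)).1 = -1
        · conv_lhs => rw [fc_eq]
          rw [if_pos hnc]
          exact (scan_none source chars k ((fnc_none_iff source chars (k : Int)).1 hnc)
            (k + 1) (some q) (by omega)).symm
        · have hncge : (k : Int) ≤ (find_next_char source chars (k : Int)).1 := by
            rcases fnc_cases source chars (k : Int) with h | ⟨c, _, heq, hne⟩
            · rw [h] at hnc; simp at hnc
            · rw [heq]; exact (ffBounds _ _ _ hne).2.1
          conv_lhs => rw [fc_eq]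
          rw [if_neg hnc, if_neg (by
            rw [hso1]
            rintro (h | h)
            · omega
            · omega)]
          rw [hso1, hso2]
          rw [show ((k : Int) + 1) = ((k + 1 : Nat) : Int) by omega]
          rw [scan_instr source chars q qs hqs (k + 1) (by omega)]
          by_cases hscm : strCloseLoop source qs ((k + 1 : Nat) : Int) = -1
          · rw [if_pos hscm, if_pos hscm]
          · rw [if_neg hscm, if_neg hscm]
            have hb := strCloseLoop_bounds source qs ((k + 1 : Nat) : Int) hscm
            rw [show strCloseLoop source qs ((k + 1 : Nat) : Int) + 1 =
                (((strCloseLoop source qs ((k + 1 : Nat) : Int)).toNat + 1 : Nat) : Int) by omega]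
            exact ih _ (by omega)
      · -- no quote at k
        have hnq : ∀ c ∈ ["'", "\""], ¬ matchAt source.toList k c.toList := by
          intro c hc hm
          rcases List.mem_cons.1 hc with rfl | hc'
          · exact hquote (Or.inl ((matchAt_singleton _ _ _).1 hm))
          · rcases List.mem_singleton.1 hc' with rfl
            exact hquote (Or.inr ((matchAt_singleton _ _ _).1 hm))
        cases hfind : chars.find? (fun c => PySem.Chars.startswith (source.toList.drop k) c.toList) with
        | some c0 =>
          have hnc := fnc_at source chars k c0 hfind hk
          have hnc1 : (find_next_char source chars (k : Int)).1 = (k : Int) := by rw [hnc]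
          have hnc2 : (find_next_char source chars (k : Int)).2 = c0 := by rw [hnc]
          conv_lhs => rw [fc_eq]
          rw [if_neg (by rw [hnc1]; omega)]
          have hcond : (find_next_char source ["'", "\""] (k : Int)).1 = -1 ∨
              (find_next_char source chars (k : Int)).1 <
              (find_next_char source ["'", "\""] (k : Int)).1 := by
            by_cases hso : (find_next_char source ["'", "\""] (k : Int)).1 = -1
            · exact Or.inl hso
            · right
              rcases fnc_cases source ["'", "\""] (k : Int) with h | ⟨c, hcm, heq, hne⟩
              · rw [h] at hso; simp at hso
              · have hge := (ffBounds _ _ _ hne).2.1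
                have hneq : PySem.Chars.findFrom source.toList c.toList (k : Int) none ≠ (k : Int) := by
                  intro he
                  exact hnq c hcm ((F_at_iff _ _ _ hk).1 he)
                rw [heq, hnc1]
                simp only
                omega
          rw [if_pos hcond, hnc]
          rw [scanB_none_unfold source chars k hk, if_neg hquote, hfind]
        | none =>
          have hA : find_closing source chars (k : Int) =
              find_closing source chars ((k + 1 : Nat) : Int) := by
            have h1 : find_next_char source chars (k : Int) =
                find_next_char source chars ((k + 1 : Nat) : Int) :=
              fnc_congr _ _ _ _ fun c hc => F_step _ _ _ hk
                (fun hm => ((List.find?_eq_none.1 hfind) c hc) ((startswith_matchAt _ _ _).2 hm))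
            have h2 : find_next_char source ["'", "\""] (k : Int) =
                find_next_char source ["'", "\""] ((k + 1 : Nat) : Int) :=
              fnc_congr _ _ _ _ fun c hc => F_step _ _ _ hk (hnq c hc)
            conv_lhs => rw [fc_eq]
            conv_rhs => rw [fc_eq]
            rw [h1, h2]
          rw [hA, ih (k + 1) (by omega), scanB_none_unfold source chars k hk,
            if_neg hquote, hfind]
  exact H (source.toList.length + 1 - k) k le_rfl

theorem A_norm (source : String) (chars : List String) (x : Int) :
    find_closing source chars x =
    find_closing source chars ((normIdx source.toList.length x : Nat) : Int) := by
  have hq : find_next_char source ["'", "\""] x =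
      find_next_char source ["'", "\""] ((normIdx source.toList.length x : Nat) : Int) :=
    fnc_congr _ _ _ _ (fun c _ => F_norm _ _ _)
  have hc : find_next_char source chars x =
      find_next_char source chars ((normIdx source.toList.length x : Nat) : Int) :=
    fnc_congr _ _ _ _ (fun c _ => F_norm _ _ _)
  conv_lhs => rw [fc_eq]
  conv_rhs => rw [fc_eq]
  rw [hq, hc]

-- ===== VERDICT (by name: the statement is the Claim_ definition above) =====
theorem find_closing_spec : Claim_equal_find_closing := by
  intro source chars start _
  unfold Spec_find_closing find_closing_alt
  rw [A_norm, main_lemma]
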